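-- pv_equiv track=rewrite | github.com/ldydek/AGH-ASD | 500+ algorithms/Sorting/ex035.py | move_element
-- ===== SOURCE A (Python) =====
-- def move_element(tab):
--     n = len(tab)
--     x = tab[0]
--     for i in range(1, n):
--         if x < tab[i]:
--             return tab
--         tab[i-1] = tab[i]
--         tab[i] = x
--     tab[n-1] = x
--     return tab
-- ===== SOURCE B (Python) =====
-- def move_element(tab):
--     x = tab[0]
--     rest = tab[1:]
--     j = next((i for i, v in enumerate(rest) if x < v), len(rest))
--     tab[:] = rest[:j] + [x] + rest[j:]
--     return tab
-- ===== Notes on version B (the rewrite author's own statement) =====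
-- stated objective: simpler
-- what changed: A's interleaved shift-and-early-return mutation loop is replaced by a single find-first-larger pass plus a slice-based reconstruction tab[:] = rest[:j] + [x] + rest[j:].
-- outside the precondition, e.g. on move_element([]): A raises IndexError, B raises IndexError
import Mathlib
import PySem

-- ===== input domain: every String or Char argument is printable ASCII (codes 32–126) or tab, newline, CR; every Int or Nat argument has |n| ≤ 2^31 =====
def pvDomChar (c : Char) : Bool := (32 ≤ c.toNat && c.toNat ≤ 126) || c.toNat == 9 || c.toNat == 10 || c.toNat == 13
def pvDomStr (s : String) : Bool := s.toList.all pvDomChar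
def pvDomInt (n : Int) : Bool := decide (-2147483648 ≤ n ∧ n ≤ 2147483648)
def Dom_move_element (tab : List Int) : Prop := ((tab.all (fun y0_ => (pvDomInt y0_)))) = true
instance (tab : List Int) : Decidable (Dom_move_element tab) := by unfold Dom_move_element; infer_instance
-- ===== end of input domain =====

-- B replaces A's interleaved shift-and-early-return loop by a find-first-larger pass plus a
-- slice reconstruction (objective: simpler). Both Pythons mutate tab in place to the same final
-- state, so the return-value equivalence proved here covers the side effect as well.

-- ===== PORT A =====
-- loop body of A: for i in range(1, n); the loop index is provably in [1, n), so it is carried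
-- as a Nat; tab.getD i 0 is tab[i] (in range on every iteration), List.set is the item assignment.
def moveLoopA (x : Int) : List Nat → List Int → List Int
  | [], tab => tab.set (tab.length - 1) x          -- tab[n-1] = x after the loop
  | i :: rest, tab =>
    if x < tab.getD i 0 then tab                   -- early return
    else moveLoopA x rest ((tab.set (i-1) (tab.getD i 0)).set i x)

def move_element (tab : List Int) : List Int :=
  match PySem.List.pyGet? tab 0 with
  | none => []                                     -- x = tab[0] raises IndexError: excluded by Pre_
  | some x => moveLoopA x (List.range' 1 (tab.length - 1)) tab

-- ===== PORT B =====
def move_element_alt (tab : List Int) : List Int :=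
  match PySem.List.pyGet? tab 0 with
  | none => []                                     -- x = tab[0] raises IndexError: excluded by Pre_
  | some x =>
    let rest := PySem.List.slice tab (some 1) none
    let j : Int :=
      match (PySem.List.enumerate rest 0).find? (fun p => decide (x < p.2)) with
      | some p => p.1
      | none => (rest.length : Int)
    PySem.List.slice rest none (some j) ++ [x] ++ PySem.List.slice rest (some j) none

-- ===== PRECONDITION & SPEC =====
-- Pre_ excludes only the empty list, on which A raises IndexError (tab[0]).
def Pre_move_element (tab : List Int) : Prop := tab ≠ []
instance (tab : List Int) : Decidable (Pre_move_element tab) := by unfold Pre_move_element; infer_instance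
def pvWitness_move_element : List Int := [3, 1, 4]

def Spec_move_element (tab : List Int) (out : List Int) : Prop := out = move_element_alt tab
instance (tab : List Int) (out : List Int) : Decidable (Spec_move_element tab out) := by unfold Spec_move_element; infer_instance

-- ===== CLAIM (what is proved, stated in full; the proofs are below) =====
def Claim_equal_move_element : Prop := ∀ (tab : List Int), Dom_move_element tab → Pre_move_element tab → Spec_move_element tab (move_element tab)

-- ===== LEMMAS AND PROOFS =====

-- the common value: x sinks into t until a strictly larger element is met
def spin (x : Int) : List Int → List Int
  | [] => [x]
  | a :: s => if x < a then x :: a :: s else a :: spin x s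

-- index of the first element of t strictly larger than x (t.length if none)
def fIdx (x : Int) : List Int → Nat
  | [] => 0
  | a :: s => if x < a then 0 else fIdx x s + 1

theorem fIdx_le (x : Int) : ∀ (t : List Int), fIdx x t ≤ t.length := by
  intro t
  induction t with
  | nil => simp [fIdx]
  | cons a s ih =>
    by_cases h : x < a
    · simp [fIdx, h]
    · simp only [fIdx, if_neg h, List.length_cons]
      omega

theorem moveLoopA_spin (x : Int) :
    ∀ (suf pre : List Int),
      moveLoopA x (List.range' (pre.length + 1) suf.length) (pre ++ x :: suf) = pre ++ spin x suf := by
  intro suf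
  induction suf with
  | nil =>
    intro pre
    simp [moveLoopA, spin]
  | cons a s ih =>
    intro pre
    have hget : (pre ++ x :: a :: s).getD (pre.length + 1) 0 = a := by
      simp [List.getD]
    rw [List.length_cons, List.range'_succ, moveLoopA, hget]
    by_cases h : x < a
    · simp [spin, h]
    · have hset1 : (pre ++ x :: a :: s).set pre.length a = pre ++ a :: a :: s := by
        rw [List.set_append_right _ _ (le_refl _)]
        simp
      have hset2 : (pre ++ a :: a :: s).set (pre.length + 1) x = (pre ++ [a]) ++ x :: s := by
        rw [List.set_append_right _ _ (by omega)]
        simp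
      have hih := ih (pre ++ [a])
      simp only [List.length_append, List.length_cons, List.length_nil, Nat.zero_add] at hih
      simp only [if_neg h, spin]
      rw [show pre.length + 1 + 1 = pre.length + 1 + 1 from rfl]
      simpa using hih

theorem move_element_eq_spin (x : Int) (t : List Int) :
    move_element (x :: t) = spin x t := by
  have h0 : PySem.List.pyGet? (x :: t) (0 : Int) = some x := by
    simp [PySem.List.pyGet?, PySem.List.pyIdx?]
  have := moveLoopA_spin x t []
  simpa [move_element, h0] using this

theorem find_enum (x : Int) :
    ∀ (t : List Int) (s : Int),
      (PySem.List.enumerate t s).find? (fun p => decide (x < p.2)) =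
        if fIdx x t < t.length then some (s + (fIdx x t : Int), t.getD (fIdx x t) 0) else none := by
  intro t
  induction t with
  | nil => intro s; simp [PySem.List.enumerate_nil, fIdx]
  | cons a u ih =>
    intro s
    rw [PySem.List.enumerate_cons, List.find?_cons]
    by_cases h : x < a
    · simp [h, fIdx]
    · have hd : decide (x < a) = false := decide_eq_false h
      simp only [hd, fIdx, if_neg h, List.length_cons, ih (s + 1)]
      by_cases h2 : fIdx x u < u.length
      · rw [if_pos h2, if_pos (by omega)]
        simp only [List.getD_cons_succ, Option.some.injEq, Prod.mk.injEq]
        constructor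
        · push_cast; ring
        · trivial
      · rw [if_neg h2, if_neg (by omega)]

theorem spin_eq_take_drop (x : Int) : ∀ (t : List Int),
    spin x t = t.take (fIdx x t) ++ x :: t.drop (fIdx x t) := by
  intro t
  induction t with
  | nil => simp [spin, fIdx]
  | cons a s ih =>
    by_cases h : x < a
    · simp [spin, fIdx, h]
    · simp [spin, fIdx, h, ih]

theorem alt_eq_spin (x : Int) (t : List Int) :
    move_element_alt (x :: t) = spin x t := by
  have h0 : PySem.List.pyGet? (x :: t) (0 : Int) = some x := by
    simp [PySem.List.pyGet?, PySem.List.pyIdx?]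
  have hrest : PySem.List.slice (x :: t) (some (1 : Int)) none = t := by
    simpa using PySem.List.slice_from_natCast (x :: t) 1
  have hfind := find_enum x t 0
  unfold move_element_alt
  rw [h0]
  simp only [hrest, hfind]
  by_cases h2 : fIdx x t < t.length
  · rw [if_pos h2]
    simp only [Int.zero_add]
    rw [PySem.List.slice_to_natCast, PySem.List.slice_from_natCast, spin_eq_take_drop]
    simp
  · rw [if_neg h2]
    have hlen : fIdx x t = t.length := le_antisymm (fIdx_le x t) (by omega)
    rw [PySem.List.slice_to_natCast, PySem.List.slice_from_natCast, spin_eq_take_drop, hlen]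
    simp

-- ===== VERDICT (by name: the statement is the Claim_ definition above) =====
theorem move_element_spec : Claim_equal_move_element := by
  intro tab _ hpre
  unfold Spec_move_element
  match tab with
  | [] => exact absurd rfl hpre
  | x :: t => rw [move_element_eq_spin, alt_eq_spin]
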